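-- pv_equiv track=rewrite | github.com/melug/Algorithms | Greedy/cupcake.py | min_walk
-- ===== SOURCE A (Python) =====
-- def min_walk(n, cupcakes):
--     cupcakes.sort(reverse=True)
--     total_walk = 0
--     t = 1
--     for cupcake in cupcakes:
--         total_walk += t*cupcake
--         t *= 2
--     return total_walk
-- ===== SOURCE B (Python) =====
-- def min_walk(n, cupcakes):
--     # Selection-based: no sorting; repeatedly extract the current minimum and
--     # fold it in Horner-style.  (Return value only: unlike A, does not sort
--     # `cupcakes` in place.)
--     remaining = list(cupcakes)
--     acc = 0
--     while remaining:
--         m = min(remaining)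
--         remaining.remove(m)
--         acc = acc * 2 + m
--     return acc
-- ===== Notes on version B (the rewrite author's own statement) =====
-- stated objective: alternative
-- what changed: Replaced sort-then-weighted-scan by a selection algorithm: no sort at all; repeatedly extract the minimum from a working copy and combine via acc = acc*2 + m (equivalence is about the return value; B does not mutate the list).
import Mathlib
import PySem

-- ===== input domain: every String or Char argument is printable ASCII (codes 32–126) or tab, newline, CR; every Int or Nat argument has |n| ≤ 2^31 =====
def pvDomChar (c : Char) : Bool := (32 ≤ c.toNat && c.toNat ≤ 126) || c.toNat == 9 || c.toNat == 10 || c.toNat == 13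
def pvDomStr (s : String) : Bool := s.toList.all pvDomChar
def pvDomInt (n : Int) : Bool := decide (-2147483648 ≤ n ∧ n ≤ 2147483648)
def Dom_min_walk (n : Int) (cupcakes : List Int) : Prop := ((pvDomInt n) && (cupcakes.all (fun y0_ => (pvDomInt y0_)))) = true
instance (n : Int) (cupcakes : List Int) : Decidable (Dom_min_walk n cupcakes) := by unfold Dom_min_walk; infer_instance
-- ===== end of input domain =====

-- B replaces A's sort-then-weighted-scan by a selection algorithm (repeated min
-- extraction with a Horner step, no sort); equivalence is about the RETURN value
-- only: A sorts `cupcakes` in place, B works on a copy and does not mutate it.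

-- ===== PORT A =====
def min_walk (_n : Int) (cupcakes : List Int) : Int :=
  let s := PySem.List.sorted cupcakes (fun x => x) true
  let r := s.foldl (fun (st : Int × Int) cupcake => (st.1 + st.2 * cupcake, st.2 * 2)) (0, 1)
  r.1

-- ===== PORT B =====
-- the 'while remaining:' loop of Source B; min()/remove() raise only on an empty
-- list, which the loop guard excludes, so the 'none' arms are unreachable guards
def minWalkLoop (remaining : List Int) (acc : Int) : Int :=
  match _hm : PySem.List.min? remaining (fun x => x) with
  | none => acc
  | some m =>
    match hr : PySem.List.remove? remaining m with
    | none => acc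
    | some rest => minWalkLoop rest (acc * 2 + m)
termination_by remaining.length
decreasing_by
  have hmem : m ∈ remaining := by
    by_contra hno
    rw [(PySem.List.remove?_eq_none_iff remaining m).mpr hno] at hr
    simp at hr
  rw [PySem.List.remove?_eq_some_erase remaining m hmem] at hr
  cases hr
  have h1 := List.length_erase_of_mem hmem
  have h2 := List.length_pos_of_mem hmem
  omega

def min_walk_alt (_n : Int) (cupcakes : List Int) : Int :=
  minWalkLoop (cupcakes) 0

-- ===== PRECONDITION & SPEC =====
def Spec_min_walk (n : Int) (cupcakes : List Int) (out : Int) : Prop := out = min_walk_alt n cupcakes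
instance (n : Int) (cupcakes : List Int) (out : Int) : Decidable (Spec_min_walk n cupcakes out) := by unfold Spec_min_walk; infer_instance

-- ===== CLAIM (what is proved, stated in full; the proofs are below) =====
def Claim_equal_min_walk : Prop := ∀ (n : Int) (cupcakes : List Int), Dom_min_walk n cupcakes → Spec_min_walk n cupcakes (min_walk n cupcakes)

-- ===== LEMMAS AND PROOFS =====

-- A's loop: the (total, weight) pair is a Horner foldr over the (sorted) list.
theorem min_walk_loop_horner (l : List Int) (tot t : Int) :
    (l.foldl (fun (st : Int × Int) c => (st.1 + st.2 * c, st.2 * 2)) (tot, t)).1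
      = tot + t * l.foldr (fun c a => a * 2 + c) 0 := by
  induction l generalizing tot t with
  | nil => simp
  | cons c rest ih =>
    simp only [List.foldl_cons, List.foldr_cons, ih]
    ring

-- Ascending sort of l starts with its minimum, followed by the ascending sort of
-- the list with the minimum's first occurrence removed.
theorem sorted_cons_min (l : List Int) (m : Int)
    (hm : PySem.List.min? l (fun x => x) = some m) :
    PySem.List.sorted l (fun x => x) false
      = m :: PySem.List.sorted (l.erase m) (fun x => x) false := by
  have hmem : m ∈ l := PySem.List.min?_mem hm
  have hmin := PySem.List.min?_isMin hm
  apply PySem.List.eq_of_perm_of_pairwise_le_of_injective (fun x : Int => x)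
    (fun _ _ h => h)
  · exact (PySem.List.sorted_perm l (fun x => x) false).trans
      ((List.perm_cons_erase hmem).trans
        (List.Perm.cons m (PySem.List.sorted_perm (l.erase m) (fun x => x) false).symm))
  · exact PySem.List.sorted_pairwise l (fun x => x)
  · refine List.Pairwise.cons ?_ (PySem.List.sorted_pairwise (l.erase m) (fun x => x))
    intro y hy
    exact hmin y (List.mem_of_mem_erase ((PySem.List.mem_sorted _ _ _ _).mp hy))

-- B's loop computes the Horner foldl over the ascending sort.
theorem minWalkLoop_spec (k : Nat) (l : List Int) (acc : Int) (hk : l.length ≤ k) :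
    minWalkLoop l acc
      = (PySem.List.sorted l (fun x => x) false).foldl (fun a c => a * 2 + c) acc := by
  induction k generalizing l acc with
  | zero =>
    have : l = [] := List.eq_nil_of_length_eq_zero (Nat.le_zero.mp hk)
    subst this
    rw [minWalkLoop]
    rfl
  | succ k ih =>
    rw [minWalkLoop]
    split
    · next hm =>
      have : l = [] := (PySem.List.min?_eq_none_iff _ _).mp hm
      subst this
      rfl
    · next m hm =>
      have hmem : m ∈ l := PySem.List.min?_mem hm
      split
      · next hr =>
        exact absurd ((PySem.List.remove?_eq_none_iff _ _).mp hr) (fun h => h hmem)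
      · next rest hr =>
        rw [PySem.List.remove?_eq_some_erase l m hmem] at hr
        cases hr
        have hlen : (l.erase m).length ≤ k := by
          have h1 := List.length_erase_of_mem hmem
          have h2 := List.length_pos_of_mem hmem
          omega
        rw [ih _ _ hlen, sorted_cons_min l m hm]
        simp

-- Descending sort reversed is ascending sort (identity key on Int).
theorem sorted_rev_reverse (l : List Int) :
    (PySem.List.sorted l (fun x => x) true).reverse
      = PySem.List.sorted l (fun x => x) false := by
  apply PySem.List.eq_of_perm_of_pairwise_le_of_injective (fun x : Int => x)
    (fun _ _ h => h)
  · exact ((List.reverse_perm _).trans (PySem.List.sorted_perm l (fun x => x) true)).trans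
      (PySem.List.sorted_perm l (fun x => x) false).symm
  · exact (List.pairwise_reverse).mpr (PySem.List.sorted_pairwise_rev l (fun x => x))
  · exact PySem.List.sorted_pairwise l (fun x => x)

-- ===== VERDICT (by name: the statement is the Claim_ definition above) =====
theorem min_walk_spec : Claim_equal_min_walk := by
  intro n cupcakes _
  show min_walk n cupcakes = min_walk_alt n cupcakes
  simp only [min_walk, min_walk_alt]
  rw [min_walk_loop_horner, minWalkLoop_spec cupcakes.length cupcakes 0 le_rfl,
    ← sorted_rev_reverse, List.foldl_reverse]
  ring
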